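-- pv_equiv track=rewrite | github.com/SakshiModi/LeetCode-Coding-Solutions | LeetCode Contests/Biweekly Contest/Biweekly Contest 86/2395_find-subarrays-with-equal-sum.py | findSubarrays
-- ===== SOURCE A (Python) =====
-- from typing import List
--
-- def findSubarrays(nums: List[int]) -> bool:
--     sumAll=set()
--     for i in range(len(nums)-1):
--         sumNow=sum(nums[i:i+2])
--         if sumNow in sumAll:
--             return True
--         sumAll.add(sumNow)
--     return False
-- ===== SOURCE B (Python) =====
-- from typing import List
--
-- def findSubarrays(nums: List[int]) -> bool:
--     sums = sorted(x + y for x, y in zip(nums, nums[1:]))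
--     for prev, cur in zip(sums, sums[1:]):
--         if prev == cur:
--             return True
--     return False
-- ===== Notes on version B (the rewrite author's own statement) =====
-- stated objective: alternative
-- what changed: B detects a repeated adjacent-pair sum by sorting the list of pair sums and scanning for two equal neighbours, replacing A's hash-set streaming loop entirely (no set at all).
import Mathlib
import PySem

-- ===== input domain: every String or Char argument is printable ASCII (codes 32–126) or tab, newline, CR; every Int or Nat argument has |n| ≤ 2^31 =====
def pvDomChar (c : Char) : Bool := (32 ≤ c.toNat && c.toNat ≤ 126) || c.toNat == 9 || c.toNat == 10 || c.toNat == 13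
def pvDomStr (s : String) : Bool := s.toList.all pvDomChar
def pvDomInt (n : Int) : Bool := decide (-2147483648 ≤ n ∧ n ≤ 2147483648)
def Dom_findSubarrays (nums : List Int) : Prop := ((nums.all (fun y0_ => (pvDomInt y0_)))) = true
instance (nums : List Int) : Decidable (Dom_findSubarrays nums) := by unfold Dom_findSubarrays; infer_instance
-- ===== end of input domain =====

-- B sorts the adjacent-pair sums and scans for two equal neighbours instead of
-- A's hash-set streaming loop (objective: alternative algorithm, no set at all).

-- ===== PORT A =====
-- the 'for i in range(len(nums)-1)' loop with its early 'return True'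
def findSubarraysGo (nums : List Int) (sumAll : PySem.Set Int) : List Int → Bool
  | [] => false
  | i :: rest =>
    let sumNow := (PySem.List.slice nums (some i) (some (i + 2))).sum
    if PySem.Set.contains sumAll sumNow then true
    else findSubarraysGo nums (PySem.Set.add sumAll sumNow) rest

def findSubarrays (nums : List Int) : Bool :=
  findSubarraysGo nums PySem.Set.empty (PySem.List.pyRange 0 ((nums.length : Int) - 1) 1)

-- ===== PORT B =====
-- the 'for prev, cur in zip(sums, sums[1:])' scan with its early 'return True'
def adjEqScan : List Int → Bool
  | [] => false
  | [_] => false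
  | x :: y :: rest => if x == y then true else adjEqScan (y :: rest)

def findSubarrays_alt (nums : List Int) : Bool :=
  let sums := PySem.List.sorted
    ((nums.zip (PySem.List.slice nums (some 1) none)).map (fun p => p.1 + p.2))
    (fun x => x) false
  adjEqScan sums

-- ===== PRECONDITION & SPEC =====
def Spec_findSubarrays (nums : List Int) (out : Bool) : Prop := out = findSubarrays_alt nums
instance (nums : List Int) (out : Bool) : Decidable (Spec_findSubarrays nums out) := by unfold Spec_findSubarrays; infer_instance

-- ===== CLAIM (what is proved, stated in full; the proofs are below) =====
def Claim_equal_findSubarrays : Prop := ∀ (nums : List Int), Dom_findSubarrays nums → Spec_findSubarrays nums (findSubarrays nums)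

-- ===== LEMMAS AND PROOFS =====

-- the list of adjacent-pair sums
def sumsOf (nums : List Int) : List Int := (nums.zip nums.tail).map (fun p => p.1 + p.2)

-- abstract streaming duplicate detector (proof helper for the A side)
def stream (seen : PySem.Set Int) : List Int → Bool
  | [] => false
  | x :: xs => if PySem.Set.contains seen x then true else stream (PySem.Set.add seen x) xs

lemma sumsOf_length (nums : List Int) : (sumsOf nums).length = nums.length - 1 := by
  simp [sumsOf]

lemma sumsOf_getElem (nums : List Int) (i : Nat) (h : i < (sumsOf nums).length) :
    (sumsOf nums)[i] = nums[i]'(by simp [sumsOf] at h; omega) + nums[i+1]'(by simp [sumsOf] at h; omega) := by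
  simp [sumsOf, List.getElem_tail]

lemma slice_sum (nums : List Int) (i : Nat) (h : i + 1 < nums.length) :
    ((nums.drop i).take 2).sum = nums[i]'(by omega) + nums[i+1] := by
  have hd : List.drop i nums
      = nums[i]'(by omega) :: nums[i+1] :: List.drop (i + 2) nums := by
    rw [List.drop_eq_getElem_cons (show i < nums.length by omega),
        List.drop_eq_getElem_cons (show i + 1 < nums.length from h)]
  rw [hd]
  show (nums[i]'(by omega) :: nums[i+1] :: List.take 0 (List.drop (i + 2) nums)).sum = _
  simp

lemma go_eq_stream (nums : List Int) (k : Nat) :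
    ∀ (i : Nat) (seen : PySem.Set Int), (sumsOf nums).length - i = k →
    findSubarraysGo nums seen (PySem.List.pyRange (i : Int) ((nums.length : Int) - 1) 1)
      = stream seen ((sumsOf nums).drop i) := by
  induction k with
  | zero =>
    intro i seen hk
    have hlen := sumsOf_length nums
    have h1 : ((nums.length : Int) - 1) ≤ (i : Int) := by omega
    rw [PySem.List.pyRange_one_eq_nil h1, List.drop_eq_nil_of_le (by omega)]
    rfl
  | succ k ih =>
    intro i seen hk
    have hlen := sumsOf_length nums
    have hi : i < (sumsOf nums).length := by omega
    have h1 : (i : Int) < (nums.length : Int) - 1 := by omega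
    have hs2 : (PySem.List.slice nums (some (i : Int)) (some ((i : Int) + 2))).sum
        = (sumsOf nums)[i] := by
      have hcast : ((i : Int) + 2) = ((i + 2 : Nat) : Int) := by push_cast; ring
      rw [hcast, PySem.List.slice_natCast, show i + 2 - i = 2 by omega,
          slice_sum nums i (by omega), sumsOf_getElem nums i hi]
    rw [PySem.List.pyRange_one_cons h1, List.drop_eq_getElem_cons hi]
    have e1 : findSubarraysGo nums seen
        ((i : Int) :: PySem.List.pyRange ((i : Int) + 1) ((nums.length : Int) - 1) 1)
        = if PySem.Set.contains seen ((sumsOf nums)[i]) then true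
          else findSubarraysGo nums (PySem.Set.add seen ((sumsOf nums)[i]))
              (PySem.List.pyRange ((i : Int) + 1) ((nums.length : Int) - 1) 1) := by
      show (if PySem.Set.contains seen ((PySem.List.slice nums (some (i : Int)) (some ((i : Int) + 2))).sum) then true
            else findSubarraysGo nums (PySem.Set.add seen ((PySem.List.slice nums (some (i : Int)) (some ((i : Int) + 2))).sum))
              (PySem.List.pyRange ((i : Int) + 1) ((nums.length : Int) - 1) 1)) = _
      rw [hs2]
    rw [e1]
    have e2 : stream seen ((sumsOf nums)[i] :: (sumsOf nums).drop (i + 1))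
        = if PySem.Set.contains seen ((sumsOf nums)[i]) then true
          else stream (PySem.Set.add seen ((sumsOf nums)[i])) ((sumsOf nums).drop (i + 1)) := rfl
    rw [e2]
    by_cases hc : PySem.Set.contains seen ((sumsOf nums)[i]) = true
    · rw [if_pos hc, if_pos hc]
    · rw [if_neg hc, if_neg hc]
      rw [show ((i : Int) + 1) = ((i + 1 : Nat) : Int) by push_cast; ring]
      exact ih (i + 1) _ (by omega)

lemma stream_iff (xs : List Int) : ∀ (seen : PySem.Set Int),
    stream seen xs = true ↔ (¬ xs.Nodup ∨ ∃ x ∈ xs, x ∈ seen) := by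
  induction xs with
  | nil => intro seen; simp [stream]
  | cons x xs ih =>
    intro seen
    have hstep : stream seen (x :: xs)
        = if PySem.Set.contains seen x then true
          else stream (PySem.Set.add seen x) xs := rfl
    by_cases hc : PySem.Set.contains seen x = true
    · have hx : x ∈ seen := (PySem.Set.contains_iff seen x).mp hc
      rw [hstep, if_pos hc]
      exact ⟨fun _ => Or.inr ⟨x, List.mem_cons_self, hx⟩, fun _ => rfl⟩
    · have hx : x ∉ seen := fun h => hc ((PySem.Set.contains_iff seen x).mpr h)
      rw [hstep, if_neg hc, ih]
      simp only [List.nodup_cons, List.mem_cons, not_and]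
      constructor
      · rintro (h | ⟨y, hy, hmem⟩)
        · tauto
        · rcases (PySem.Set.mem_add seen x y).mp hmem with h | h
          · exact Or.inr ⟨y, Or.inr hy, h⟩
          · subst h; tauto
      · rintro (h | ⟨y, hy, hmem⟩)
        · rcases Classical.em (x ∈ xs) with hm | hm
          · exact Or.inr ⟨x, hm, (PySem.Set.mem_add seen x x).mpr (Or.inr rfl)⟩
          · tauto
        · rcases hy with rfl | hy
          · exact absurd hmem hx
          · exact Or.inr ⟨y, hy, (PySem.Set.mem_add seen x y).mpr (Or.inl hmem)⟩

-- the B side: on a ≤-sorted list, the adjacent-equality scan decides ¬Nodup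
lemma adjEqScan_false_iff (xs : List Int) (hs : xs.Pairwise (· ≤ ·)) :
    adjEqScan xs = false ↔ xs.Pairwise (· < ·) := by
  induction xs with
  | nil => simp [adjEqScan]
  | cons x xs ih =>
    cases xs with
    | nil => simp [adjEqScan]
    | cons y ys =>
      rcases List.pairwise_cons.mp hs with ⟨hxall, htail⟩
      have hxy : x ≤ y := hxall y List.mem_cons_self
      have hrec := ih htail
      constructor
      · intro h
        have hne : (x == y) = false := by
          by_contra hb
          have : (x == y) = true := by
            cases hxy' : (x == y) <;> simp_all
          simp [adjEqScan, this] at h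
        have hxny : x ≠ y := by simpa using hne
        have hrest : adjEqScan (y :: ys) = false := by
          simpa [adjEqScan, hne] using h
        have hlt := hrec.mp hrest
        refine List.pairwise_cons.mpr ⟨?_, hlt⟩
        intro z hz
        rcases List.mem_cons.mp hz with rfl | hz'
        · exact lt_of_le_of_ne hxy hxny
        · have hyz : y < z := (List.pairwise_cons.mp hlt).1 z hz'
          exact lt_of_le_of_lt (hxy) hyz
      · intro h
        rcases List.pairwise_cons.mp h with ⟨hxltall, hlt⟩
        have hxny : x ≠ y := ne_of_lt (hxltall y List.mem_cons_self)
        have hne : (x == y) = false := by simpa using hxny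
        have hrest := hrec.mpr hlt
        simp [adjEqScan, hne, hrest]

lemma nodup_iff_pairwise_lt (xs : List Int) (hs : xs.Pairwise (· ≤ ·)) :
    xs.Nodup ↔ xs.Pairwise (· < ·) := by
  constructor
  · intro hnd
    exact (hnd.and hs).imp (fun h => lt_of_le_of_ne h.2 h.1)
  · intro hlt
    exact hlt.imp ne_of_lt

lemma alt_iff (nums : List Int) :
    findSubarrays_alt nums = true ↔ ¬ (sumsOf nums).Nodup := by
  unfold findSubarrays_alt
  rw [PySem.List.slice_from_one]
  have hperm : (PySem.List.sorted (sumsOf nums) (fun x => x) false).Perm (sumsOf nums) :=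
    PySem.List.sorted_perm _ _ _
  have hpw : (PySem.List.sorted (sumsOf nums) (fun x => x) false).Pairwise (· ≤ ·) := by
    simpa using PySem.List.sorted_pairwise (xs := sumsOf nums) (key := fun x => x)
  constructor
  · intro h hnd
    have hnd' := hperm.nodup_iff.mpr hnd
    have := (adjEqScan_false_iff _ hpw).mpr ((nodup_iff_pairwise_lt _ hpw).mp hnd')
    simp only [sumsOf] at this h
    rw [this] at h
    exact Bool.false_ne_true h
  · intro hnd
    by_contra h
    have hfalse : adjEqScan (PySem.List.sorted (sumsOf nums) (fun x => x) false) = false := by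
      simp only [sumsOf] at h ⊢
      cases hb : adjEqScan (PySem.List.sorted ((nums.zip nums.tail).map (fun p => p.1 + p.2)) (fun x => x) false)
      · rfl
      · exact absurd hb h
    have hlt := (adjEqScan_false_iff _ hpw).mp hfalse
    exact hnd (hperm.nodup_iff.mp ((nodup_iff_pairwise_lt _ hpw).mpr hlt))

-- ===== VERDICT (by name: the statement is the Claim_ definition above) =====
theorem findSubarrays_spec : Claim_equal_findSubarrays := by
  intro nums _
  unfold Spec_findSubarrays
  apply Bool.eq_iff_iff.mpr
  unfold findSubarrays
  rw [show (0 : Int) = ((0 : Nat) : Int) from rfl,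
      go_eq_stream nums ((sumsOf nums).length) 0 PySem.Set.empty (by omega)]
  rw [List.drop_zero, stream_iff, alt_iff]
  simp [PySem.Set.empty]
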